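-- pv_equiv track=rewrite | github.com/whipbaek/Algorithm-Study | 프로그래머스/3/77886. 110 옮기기/110 옮기기.py | solution
-- ===== SOURCE A (Python) =====
-- def solution(ss):
--     answer = []
--     for s in ss:
--         cnt = 0
--
--         st = [] # stack
--         for val in s:
--             # 스택에서 110을 발견한다면
--             if len(st) >= 2 and val == "0" and st[-1] == "1" and st[-2] == "1":
--                 cnt +=1
--                 st.pop()
--                 st.pop()
--             else:
--                 st.append(val)
--
--         # 뒤부터 돌면서 0이 존재하는지 검사한다.
--         zero_idx = -1
--
--         for i in range(len(st)):
--             if st[i] == "0":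
--                 zero_idx = i
--
--         # 0이 없다면 -> 110을 앞에 붙여준다.
--         if zero_idx == -1:
--             answer.append("110" * cnt + "".join(st))
--
--         # 0이 있다면, 그 중간에 붙여준다.
--         else:
--             answer.append("".join(st[:zero_idx+1]) + "110" * cnt + "".join(st[zero_idx+1:]))
--
--     return answer
-- ===== SOURCE B (Python) =====
-- def solution(ss):
--     answer = []
--     for s in ss:
--         # collapse: repeatedly delete the leftmost '110' (confluent, so the
--         # residue and removal count match any removal order)
--         cnt = 0
--         i = s.find('110')
--         while i != -1:
--             cnt += 1
--             s = s[:i] + s[i + 3:]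
--             i = s.find('110')
--         # re-insert all removed '110's right after the last '0' of the residue
--         z = s.rfind('0')
--         if z == -1:
--             answer.append('110' * cnt + s)
--         else:
--             answer.append(s[:z + 1] + '110' * cnt + s[z + 1:])
--     return answer
-- ===== Notes on version B (the rewrite author's own statement) =====
-- stated objective: alternative
-- what changed: A collapses each string with a one-pass character stack and finds the last zero with an index loop; B instead deletes the leftmost '110' repeatedly via find-and-splice (confluence of the rewrite makes the residue and count identical) and locates the insertion point with str.rfind.
import Mathlib
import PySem

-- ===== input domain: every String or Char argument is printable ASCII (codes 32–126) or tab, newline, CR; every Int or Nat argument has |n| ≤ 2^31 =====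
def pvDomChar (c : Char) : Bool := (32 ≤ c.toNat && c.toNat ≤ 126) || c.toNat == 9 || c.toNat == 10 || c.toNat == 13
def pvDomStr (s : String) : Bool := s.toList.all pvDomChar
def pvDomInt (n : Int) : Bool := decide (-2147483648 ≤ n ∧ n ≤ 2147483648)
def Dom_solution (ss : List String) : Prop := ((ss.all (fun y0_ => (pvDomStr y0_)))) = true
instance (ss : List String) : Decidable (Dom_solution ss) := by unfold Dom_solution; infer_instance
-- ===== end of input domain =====

-- B replaces A's one-pass character stack by repeated deletion of the leftmost '110' (find + splice)
-- and finds the last '0' with rfind instead of an index loop; objective: alternative (same results, different algorithm).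

-- ===== PORT A =====
-- '110' * cnt : exact port of Python str * int (a non-positive count gives the empty string)
def pyStrMul (cs : List Char) (n : Int) : List Char := (List.replicate n.toNat cs).flatten

-- the body of A's inner loop; the state is (stack, cnt)
def stepA (p : List Char × Int) (val : Char) : List Char × Int :=
  if decide (2 ≤ p.1.length) && (val == '0') && (PySem.List.pyGet? p.1 (-1) == some '1')
      && (PySem.List.pyGet? p.1 (-2) == some '1')
  then (p.1.dropLast.dropLast, p.2 + 1)
  else (p.1 ++ [val], p.2)

-- A's second loop: zero_idx over range(len(st))
def lastZeroA (st : List Char) : Int :=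
  (PySem.List.pyRange 0 (st.length : Int) 1).foldl
    (fun zero_idx i => if PySem.List.pyGet? st i == some '0' then i else zero_idx) (-1)

def buildA (s : String) : String :=
  let r := s.toList.foldl stepA ([], 0)
  let z := lastZeroA r.1
  if z = -1 then String.ofList (pyStrMul ['1','1','0'] r.2 ++ r.1)
  else String.ofList (PySem.List.slice r.1 none (some (z + 1)) ++ pyStrMul ['1','1','0'] r.2
        ++ PySem.List.slice r.1 (some (z + 1)) none)

def solution (ss : List String) : List String :=
  ss.foldl (fun answer s => answer ++ [buildA s]) []

-- ===== PORT B =====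
-- support for collapseB's termination: a found '110' really occurs at the found index
theorem find110_split (s : List Char) (h : ¬ PySem.Chars.find s ['1','1','0'] = -1) :
    0 ≤ PySem.Chars.find s ['1','1','0'] ∧
    (PySem.Chars.find s ['1','1','0']).toNat + 3 ≤ s.length ∧
    s = s.take (PySem.Chars.find s ['1','1','0']).toNat ++ ['1','1','0'] ++
        s.drop ((PySem.Chars.find s ['1','1','0']).toNat + 3) := by
  set i := PySem.Chars.find s ['1','1','0'] with hi
  have hnn : 0 ≤ i := by
    rcases (PySem.Chars.neg_one_le_find s ['1','1','0']).lt_or_eq with h' | h'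
    · omega
    · exact absurd h'.symm h
  obtain ⟨hpre, -⟩ := PySem.Chars.find_spec hnn
  obtain ⟨u, hu⟩ := hpre
  have hlen : i.toNat + 3 ≤ s.length := by
    have : (s.drop i.toNat).length = 3 + u.length := by rw [← hu]; simp; omega
    simp at this; omega
  refine ⟨hnn, hlen, ?_⟩
  have hdrop : s.drop (i.toNat + 3) = u := by
    have : s.drop (i.toNat + 3) = (s.drop i.toNat).drop 3 := by
      rw [List.drop_drop, Nat.add_comm]
    rw [this, ← hu]; rfl
  conv_lhs => rw [← List.take_append_drop i.toNat s]
  rw [← hu, hdrop]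
  simp

-- termination of B's while loop: each splice removes three characters
theorem collapseB_dec (s : List Char) (h : ¬ PySem.Chars.find s ['1','1','0'] = -1) :
    (PySem.Chars.slice s none (some (PySem.Chars.find s ['1','1','0'])) ++
     PySem.Chars.slice s (some (PySem.Chars.find s ['1','1','0'] + 3)) none).length < s.length := by
  obtain ⟨hnn, hlen, -⟩ := find110_split s h
  rw [PySem.Chars.slice_eq_listSlice, PySem.Chars.slice_eq_listSlice,
    PySem.List.slice_to _ hnn, PySem.List.slice_from _ (by omega)]
  have : (PySem.Chars.find s ['1','1','0'] + 3).toNat = (PySem.Chars.find s ['1','1','0']).toNat + 3 := by omega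
  rw [this]
  simp only [List.length_append, List.length_take, List.length_drop]
  omega

-- B's while loop: i = s.find('110'); while i != -1: cnt += 1; s = s[:i] + s[i+3:]; i = s.find('110')
def collapseB (s : List Char) (cnt : Int) : List Char × Int :=
  let i := PySem.Chars.find s ['1','1','0']
  if h : i = -1 then (s, cnt)
  else collapseB (PySem.Chars.slice s none (some i) ++ PySem.Chars.slice s (some (i + 3)) none)
        (cnt + 1)
termination_by s.length
decreasing_by exact collapseB_dec s h

def buildB (s : String) : String :=
  let r := collapseB s.toList 0
  let z := PySem.Chars.rfind r.1 ['0']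
  if z = -1 then String.ofList (pyStrMul ['1','1','0'] r.2 ++ r.1)
  else String.ofList (PySem.Chars.slice r.1 none (some (z + 1)) ++ pyStrMul ['1','1','0'] r.2
        ++ PySem.Chars.slice r.1 (some (z + 1)) none)

def solution_alt (ss : List String) : List String := ss.map buildB

-- ===== PRECONDITION & SPEC =====
def Spec_solution (ss : List String) (out : List String) : Prop := out = solution_alt ss
instance (ss : List String) (out : List String) : Decidable (Spec_solution ss out) := by unfold Spec_solution; infer_instance

-- ===== CLAIM (what is proved, stated in full; the proofs are below) =====
def Claim_equal_solution : Prop := ∀ (ss : List String), Dom_solution ss → Spec_solution ss (solution ss)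

-- ===== LEMMAS AND PROOFS =====

theorem pyGet?_concat2_neg_one {α : Type} (xs : List α) (a b : α) :
    PySem.List.pyGet? (xs ++ [a, b]) (-1) = some b := by
  simp [PySem.List.pyGet?, PySem.List.pyIdx?]

theorem pyGet?_concat2_neg_two {α : Type} (xs : List α) (a b : α) :
    PySem.List.pyGet? (xs ++ [a, b]) (-2) = some a := by
  simp [PySem.List.pyGet?, PySem.List.pyIdx?]

theorem stepA_shift (p : List Char × Int) (v : Char) :
    stepA (p.1, p.2 + 1) v = ((stepA p v).1, (stepA p v).2 + 1) := by
  unfold stepA; split_ifs <;> rfl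

theorem foldA_shift (l : List Char) (st : List Char) (c : Int) :
    l.foldl stepA (st, c + 1) = ((l.foldl stepA (st, c)).1, (l.foldl stepA (st, c)).2 + 1) := by
  induction l generalizing st c with
  | nil => rfl
  | cons v l ih =>
      simp only [List.foldl_cons]
      rw [show (st, c + 1) = ((st, c).1, (st, c).2 + 1) from rfl, stepA_shift]
      rw [show stepA (st, c) v = ((stepA (st, c) v).1, (stepA (st, c) v).2) from rfl]
      exact ih _ _

theorem foldA_110 (y : List Char) (st : List Char) (c : Int) :
    List.foldl stepA (st, c) ('1' :: '1' :: '0' :: y) = List.foldl stepA (st, c + 1) y := by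
  simp only [List.foldl_cons]
  have e1 : stepA (st, c) '1' = (st ++ ['1'], c) := by simp [stepA]
  have e2 : stepA (st ++ ['1'], c) '1' = (st ++ ['1', '1'], c) := by simp [stepA]
  have e3 : stepA (st ++ ['1', '1'], c) '0' = (st, c + 1) := by
    have h1 : st ++ ['1','1'] = (st ++ ['1']) ++ ['1'] := by simp
    have g1 : PySem.List.pyGet? (st ++ ['1','1']) (-1) = some '1' := pyGet?_concat2_neg_one st '1' '1'
    have g2 : PySem.List.pyGet? (st ++ ['1','1']) (-2) = some '1' := pyGet?_concat2_neg_two st '1' '1'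
    have hc : (decide (2 ≤ (st ++ ['1','1']).length) && (('0':Char) == '0')
        && (PySem.List.pyGet? (st ++ ['1','1']) (-1) == some '1')
        && (PySem.List.pyGet? (st ++ ['1','1']) (-2) == some '1')) = true := by
      simp [g1, g2]
    unfold stepA
    rw [if_pos hc]
    rw [show (st ++ ['1','1']).dropLast.dropLast = st by
      rw [h1, List.dropLast_concat, List.dropLast_concat]]
  rw [e1, e2, e3]

theorem stack_shape (st : List Char) (h2 : 2 ≤ st.length)
    (h1 : PySem.List.pyGet? st (-1) = some '1') (h0 : PySem.List.pyGet? st (-2) = some '1') :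
    ∃ u, st = u ++ ['1', '1'] := by
  have e1 : st[st.length - 1]? = some '1' := by
    simpa [PySem.List.pyGet?, PySem.List.pyIdx?, show -(st.length:Int) ≤ -1 by omega,
      show ¬ (0:Int) ≤ -1 by omega] using h1
  have e0 : st[st.length - 2]? = some '1' := by
    simpa [PySem.List.pyGet?, PySem.List.pyIdx?, show -(st.length:Int) ≤ -2 by omega,
      show ¬ (0:Int) ≤ -2 by omega] using h0
  have g1 : st[st.length - 1]'(by omega) = '1' := by
    rwa [List.getElem?_eq_getElem (by omega), Option.some_inj] at e1
  have g0 : st[st.length - 2]'(by omega) = '1' := by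
    rwa [List.getElem?_eq_getElem (by omega), Option.some_inj] at e0
  refine ⟨st.take (st.length - 2), ?_⟩
  have hd : st.drop (st.length - 2) = ['1', '1'] := by
    rw [List.drop_eq_getElem_cons (show st.length - 2 < st.length by omega)]
    rw [show st.length - 2 + 1 = st.length - 1 by omega]
    rw [List.drop_eq_getElem_cons (show st.length - 1 < st.length by omega)]
    rw [show st.length - 1 + 1 = st.length by omega, List.drop_length, g0, g1]
  conv_lhs => rw [← List.take_append_drop (st.length - 2) st]
  rw [hd]

theorem foldA_free (t : List Char) (st : List Char) (c : Int)
    (h : ¬ ['1', '1', '0'] <:+: (st ++ t)) :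
    List.foldl stepA (st, c) t = (st ++ t, c) := by
  induction t generalizing st c with
  | nil => simp
  | cons v t' ih =>
      have hstep : stepA (st, c) v = (st ++ [v], c) := by
        unfold stepA
        split
        · rename_i hc
          simp only [Bool.and_eq_true, decide_eq_true_eq, beq_iff_eq] at hc
          obtain ⟨⟨⟨hl, hv⟩, hg1⟩, hg2⟩ := hc
          obtain ⟨u, hu⟩ := stack_shape st hl hg1 hg2
          exact absurd ⟨u, t', by simp [hu, hv]⟩ h
        · rfl
      rw [List.foldl_cons, hstep, ih (st ++ [v]) c (by simpa using h)]
      simp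

theorem stackFold_eq_collapseB (s : List Char) (c : Int) :
    s.foldl stepA ([], c) = collapseB s c := by
  fun_induction collapseB s c with
  | case1 s c i h =>
      have hni : ¬ ['1','1','0'] <:+: s := by
        rw [← PySem.Chars.find_eq_neg_one_iff]; exact h
      simpa using foldA_free s [] c (by simpa using hni)
  | case2 s c i h ih =>
      obtain ⟨hnn, hlen, hsplit⟩ := find110_split s h
      have hslice : PySem.Chars.slice s none (some i) ++ PySem.Chars.slice s (some (i + 3)) none
          = s.take i.toNat ++ s.drop (i.toNat + 3) := by
        rw [PySem.Chars.slice_eq_listSlice, PySem.Chars.slice_eq_listSlice,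
          PySem.List.slice_to _ hnn, PySem.List.slice_from _ (by omega),
          show (i + 3).toNat = i.toNat + 3 by omega]
      rw [← ih, hslice]
      conv_lhs => rw [hsplit]
      rw [List.append_assoc]
      set p := List.foldl stepA ([], c) (s.take i.toNat) with hp
      have hlhs : List.foldl stepA ([], c) (s.take i.toNat ++ (['1','1','0'] ++ s.drop (i.toNat + 3)))
          = List.foldl stepA (p.1, p.2 + 1) (s.drop (i.toNat + 3)) := by
        rw [List.foldl_append, ← hp, ← Prod.mk.eta (p := p)]
        exact foldA_110 _ _ _
      have hrhs : List.foldl stepA ([], c + 1) (s.take i.toNat ++ s.drop (i.toNat + 3))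
          = List.foldl stepA (p.1, p.2 + 1) (s.drop (i.toNat + 3)) := by
        rw [List.foldl_append, foldA_shift, ← hp]
      rw [hlhs, hrhs]

theorem prefix0 (st : List Char) (n : Nat) :
    List.isPrefixOf ['0'] (st.drop n) = (st[n]? == some '0') := by
  by_cases h : n < st.length
  · rw [List.drop_eq_getElem_cons h]
    rcases Decidable.em (st[n] = '0') with h0 | h0
    · simp [List.isPrefixOf, List.getElem?_eq_getElem h, h0]
    · simp [List.isPrefixOf, List.getElem?_eq_getElem h, h0]
      exact fun h' => h0 h'.symm
  · rw [List.drop_eq_nil_of_le (by omega), List.getElem?_eq_none (by omega)]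
    simp [List.isPrefixOf]

theorem go_succ (st : List Char) (n : Nat) :
    PySem.Chars.rfind.go st ['0'] (n+1) =
      if List.isPrefixOf ['0'] (st.drop (n+1)) then ((n:Int)+1) else PySem.Chars.rfind.go st ['0'] n := by
  rw [PySem.Chars.rfind.go]; push_cast; rfl

theorem pyGet?_cast (st : List Char) (n : Nat) : PySem.List.pyGet? st (n : Int) = st[n]? := by
  by_cases h : n < st.length
  · simp [PySem.List.pyGet?, PySem.List.pyIdx?, h]
  · simp [PySem.List.pyGet?, PySem.List.pyIdx?, h]

theorem foldZ_go (st : List Char) (n : Nat) :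
    (PySem.List.pyRange 0 ((n : Int) + 1) 1).foldl
      (fun zero_idx i => if PySem.List.pyGet? st i == some '0' then i else zero_idx) (-1)
      = PySem.Chars.rfind.go st ['0'] n := by
  induction n with
  | zero =>
      have p0 : (['0'].isPrefixOf st) = (st[0]? == some '0') := by
        simpa using prefix0 st 0
      rw [show ((0:Nat):Int) + 1 = 0 + 1 by norm_num, PySem.List.pyRange_one_singleton]
      rw [PySem.Chars.rfind.go]
      simp only [p0, List.foldl_cons, List.foldl_nil]
      rw [show PySem.List.pyGet? st (0:Int) = st[0]? from pyGet?_cast st 0]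
  | succ m ih =>
      rw [show ((m+1:Nat):Int) + 1 = ((m:Int)+1) + 1 by push_cast; ring,
        PySem.List.pyRange_one_succ_right (show (0:Int) ≤ (m:Int)+1 by omega),
        List.foldl_append, ih, go_succ, prefix0]
      have hg : PySem.List.pyGet? st ((m:Int)+1) = st[m+1]? := by
        rw [show (m:Int)+1 = ((m+1:Nat):Int) by push_cast; ring, pyGet?_cast]
      simp only [List.foldl_cons, List.foldl_nil, hg]

theorem lastZero_eq (st : List Char) : lastZeroA st = PySem.Chars.rfind st ['0'] := by
  unfold lastZeroA PySem.Chars.rfind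
  cases hl : st.length with
  | zero =>
      rw [List.length_eq_zero_iff] at hl
      subst hl
      rw [PySem.Chars.rfind.go]
      simp [PySem.List.pyRange_one_eq_nil, List.isPrefixOf]
  | succ m =>
      rw [show ((m+1:Nat):Int) = (m:Int)+1 by push_cast; ring, foldZ_go, go_succ, prefix0,
        List.getElem?_eq_none (show st.length ≤ m+1 by omega)]
      simp

theorem build_eq (s : String) : buildA s = buildB s := by
  simp only [buildA, buildB, stackFold_eq_collapseB, lastZero_eq, PySem.Chars.slice_eq_listSlice]

-- ===== VERDICT (by name: the statement is the Claim_ definition above) =====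
theorem solution_spec : Claim_equal_solution := by
  intro ss _
  unfold Spec_solution solution solution_alt
  rw [PySem.List.foldl_append_singleton_eq_map]
  exact List.map_congr_left fun s _ => build_eq s
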